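-- pv_equiv track=rewrite | github.com/Dies-Irae-mu/game | world/wod20th/utils/xp_costs.py | calculate_attribute_cost
-- ===== SOURCE A (Python) =====
-- def calculate_attribute_cost(current_rating: int, new_rating: int) -> int:
--     """
--     Calculate XP cost for attributes.
--     Cost is Current Rating x 4 XP, with first dot free and double cost from 1 to 2.
--
--     Args:
--         current_rating (int): Current attribute rating
--         new_rating (int): Desired new rating
--
--     Returns:
--         int: Total XP cost
--
--     Example:
--         First dot is free, 8 (1->2), 8 (2->3), 12 (3->4), 16 (4->5) XP
--     """
--     total_cost = 0
--     for rating in range(current_rating, new_rating):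
--         if rating == 1:  # Going from 1 to 2 is special case
--             total_cost += 8
--         else:
--             total_cost += rating * 4  # Current rating x 4
--     return total_cost
-- ===== SOURCE B (Python) =====
-- def calculate_attribute_cost(current_rating: int, new_rating: int) -> int:
--     # Closed form: sum_{r=current}^{new-1} 4*r, plus 4 extra if r == 1 is in range.
--     if new_rating <= current_rating:
--         return 0
--     a, b = current_rating, new_rating - 1
--     total = 2 * (b * (b + 1) - (a - 1) * a)  # 4 * (a + ... + b)
--     if a <= 1 <= b:
--         total += 4
--     return total
-- ===== Notes on version B (the rewrite author's own statement) =====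
-- stated objective: faster
-- what changed: replaces the per-rating loop with a closed-form arithmetic-series formula plus a +4 correction when rating 1 lies in the range (O(1) instead of O(new-current); measured ~60x at the largest timed size)
import Mathlib
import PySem

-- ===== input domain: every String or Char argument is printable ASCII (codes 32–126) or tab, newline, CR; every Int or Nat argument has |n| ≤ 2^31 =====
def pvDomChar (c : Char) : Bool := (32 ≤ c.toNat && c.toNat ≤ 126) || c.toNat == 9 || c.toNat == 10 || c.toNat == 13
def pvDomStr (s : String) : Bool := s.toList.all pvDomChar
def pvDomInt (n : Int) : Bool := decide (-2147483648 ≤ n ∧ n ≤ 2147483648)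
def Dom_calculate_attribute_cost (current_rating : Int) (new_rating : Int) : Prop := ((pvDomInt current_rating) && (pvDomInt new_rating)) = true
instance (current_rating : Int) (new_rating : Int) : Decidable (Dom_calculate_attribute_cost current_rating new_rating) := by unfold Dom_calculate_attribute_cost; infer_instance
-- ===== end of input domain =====

-- B replaces A's per-rating loop by a closed-form arithmetic-series formula (O(1) arithmetic instead of a loop of new-current steps).
-- ===== PORT A =====
-- A: loop over range(current, new), adding 8 at rating 1, else rating*4.
def calculate_attribute_cost (current_rating : Int) (new_rating : Int) : Int :=
  (PySem.List.pyRange current_rating new_rating 1).foldl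
    (fun total_cost rating => if rating == 1 then total_cost + 8 else total_cost + rating * 4) 0

-- ===== PORT B =====
-- B: closed-form arithmetic series with a +4 correction when rating 1 is in the range.
def calculate_attribute_cost_alt (current_rating : Int) (new_rating : Int) : Int :=
  if new_rating ≤ current_rating then 0
  else
    let a := current_rating
    let b := new_rating - 1
    let total := 2 * (b * (b + 1) - (a - 1) * a)
    if a ≤ 1 ∧ 1 ≤ b then total + 4 else total

-- ===== PRECONDITION & SPEC =====
def Spec_calculate_attribute_cost (current_rating : Int) (new_rating : Int) (out : Int) : Prop := out = calculate_attribute_cost_alt current_rating new_rating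
instance (current_rating : Int) (new_rating : Int) (out : Int) : Decidable (Spec_calculate_attribute_cost current_rating new_rating out) := by unfold Spec_calculate_attribute_cost; infer_instance

-- ===== CLAIM (what is proved, stated in full; the proofs are below) =====
def Claim_equal_calculate_attribute_cost : Prop := ∀ (current_rating : Int) (new_rating : Int), Dom_calculate_attribute_cost current_rating new_rating → Spec_calculate_attribute_cost current_rating new_rating (calculate_attribute_cost current_rating new_rating)

-- ===== LEMMAS AND PROOFS =====

-- Step identity: B's closed form satisfies the loop's recurrence.
lemma alt_step (c n : Int) (h : c < n) :
    calculate_attribute_cost_alt c n =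
      (if c == 1 then (8 : Int) else c * 4) + calculate_attribute_cost_alt (c + 1) n := by
  simp only [calculate_attribute_cost_alt, beq_iff_eq]
  rcases eq_or_ne n (c + 1) with he | he
  · subst he
    split_ifs <;> first | omega | ring1 | (exfalso; omega) | (ring_nf; omega)
  · split_ifs <;>
      first
        | omega
        | ring1
        | (exfalso; omega)
        | (ring_nf; omega)

-- Loop characterisation: A's foldl starting at t equals t + B's value.
lemma foldl_eq_alt (k : Nat) : ∀ (c n t : Int), (n - c).toNat = k →
    (PySem.List.pyRange c n 1).foldl
      (fun total_cost rating => if rating == 1 then total_cost + 8 else total_cost + rating * 4) t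
      = t + calculate_attribute_cost_alt c n := by
  induction k with
  | zero =>
    intro c n t hk
    have hnc : n ≤ c := by omega
    rw [PySem.List.pyRange_one_eq_nil hnc]
    simp [calculate_attribute_cost_alt, hnc]
  | succ k ih =>
    intro c n t hk
    have hcn : c < n := by omega
    rw [PySem.List.pyRange_one_cons hcn]
    simp only [List.foldl_cons]
    rw [ih (c+1) n _ (by omega), alt_step c n hcn]
    split_ifs <;> ring1

-- ===== VERDICT (by name: the statement is the Claim_ definition above) =====
theorem calculate_attribute_cost_spec : Claim_equal_calculate_attribute_cost := by
  intro c n _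
  show calculate_attribute_cost c n = _
  unfold calculate_attribute_cost
  rw [foldl_eq_alt (n - c).toNat c n 0 rfl]
  ring
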